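-- pv_equiv track=rewrite | github.com/aranya-code/Coding-Challenges | ChairRequirements.py | MinChairs
-- ===== SOURCE A (Python) =====
-- def MinChairs(simulations):
--     chairs = []
--
--     for simulation in simulations:
--         chairCount = 0
--         chair_needed = 0
--         for letter in simulation:
--             if letter == 'C' or letter == 'U':
--                 if chairCount == 0:
--                     chair_needed+=1
--                 else:
--                     chairCount-=1
--             elif letter == 'R' or letter == 'L':
--                 chairCount+=1
--         chairs.append(chair_needed)
--     return chairs
-- ===== SOURCE B (Python) =====
-- def MinChairs(simulations):
--     def need(sim):
--         # prefix sums of the +1/-1/0 deltas, starting from 0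
--         prefixes = [0]
--         for ch in sim:
--             d = 1 if ch in ('C', 'U') else (-1 if ch in ('R', 'L') else 0)
--             prefixes.append(prefixes[-1] + d)
--         return max(prefixes)
--     return [need(sim) for sim in simulations]
-- ===== Notes on version B (the rewrite author's own statement) =====
-- stated objective: alternative
-- what changed: Replaced the allocate/free two-counter simulation (free-chair pool plus needed counter with a branch on pool emptiness) by a staged max-prefix-sum: build the list of prefix sums of per-character deltas (+1 for C/U, -1 for R/L, 0 otherwise) starting at 0, and return its maximum.
import Mathlib
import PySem

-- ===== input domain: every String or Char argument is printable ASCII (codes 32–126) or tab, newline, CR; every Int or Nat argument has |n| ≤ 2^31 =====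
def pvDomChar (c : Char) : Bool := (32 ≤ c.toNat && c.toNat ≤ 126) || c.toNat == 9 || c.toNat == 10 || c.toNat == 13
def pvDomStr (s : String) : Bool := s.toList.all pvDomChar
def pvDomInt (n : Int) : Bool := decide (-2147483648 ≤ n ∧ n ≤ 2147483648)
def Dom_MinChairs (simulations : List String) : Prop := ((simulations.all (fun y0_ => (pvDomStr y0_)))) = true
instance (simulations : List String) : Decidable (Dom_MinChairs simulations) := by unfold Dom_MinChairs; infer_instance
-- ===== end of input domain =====

-- B replaces A's allocate/free two-counter simulation by staged passes: prefix sums of per-character deltas, then their maximum (objective: alternative).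


-- ===== PORT A =====
-- state = (chairCount, chair_needed)
def pvAStep (s : Int × Int) (letter : Char) : Int × Int :=
  if letter = 'C' ∨ letter = 'U' then
    if s.1 = 0 then (s.1, s.2 + 1) else (s.1 - 1, s.2)
  else if letter = 'R' ∨ letter = 'L' then (s.1 + 1, s.2)
  else s

def MinChairs (simulations : List String) : List Int :=
  simulations.foldl (fun chairs simulation =>
    chairs ++ [(simulation.toList.foldl pvAStep (0, 0)).2]) []

-- ===== PORT B =====
def pvDelta (ch : Char) : Int :=
  if ch = 'C' ∨ ch = 'U' then 1 else if ch = 'R' ∨ ch = 'L' then -1 else 0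

-- prefixes = [0] extended by prefixes[-1] + d  ==  scanl (+ delta) 0;
-- max(prefixes) ported as foldl max 0: exact, since prefixes is nonempty with head 0.
def pvNeed (sim : String) : Int :=
  (sim.toList.scanl (fun p ch => p + pvDelta ch) 0).foldl max 0

def MinChairs_alt (simulations : List String) : List Int :=
  simulations.map pvNeed

-- ===== PRECONDITION & SPEC =====
def Spec_MinChairs (simulations : List String) (out : List Int) : Prop := out = MinChairs_alt simulations
instance (simulations : List String) (out : List Int) : Decidable (Spec_MinChairs simulations out) := by unfold Spec_MinChairs; infer_instance

-- ===== CLAIM (what is proved, stated in full; the proofs are below) =====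
def Claim_equal_MinChairs : Prop := ∀ (simulations : List String), Dom_MinChairs simulations → Spec_MinChairs simulations (MinChairs simulations)

-- ===== LEMMAS AND PROOFS =====
-- running maximum of the prefix sums of deltas, starting from b
def pvMaxScan (b : Int) (cs : List Char) : Int :=
  match cs with
  | [] => b
  | c :: cs => max b (pvMaxScan (b + pvDelta c) cs)

theorem pvMaxScan_ge (b : Int) (cs : List Char) : b ≤ pvMaxScan b cs := by
  induction cs generalizing b with
  | nil => simp [pvMaxScan]
  | cons c cs ih => simp [pvMaxScan]

theorem pvFoldlMax_scanl (cs : List Char) (m b : Int) :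
    (cs.scanl (fun p ch => p + pvDelta ch) b).foldl max m = max m (pvMaxScan b cs) := by
  induction cs generalizing m b with
  | nil => simp [pvMaxScan]
  | cons c cs ih =>
      rw [List.scanl_cons]
      simp only [List.foldl, pvMaxScan]
      rw [ih]
      omega

-- invariant: A's state a = (chairCount, chair_needed), 0 ≤ chairCount;
-- the answer from state a equals max of a.2 and the max prefix sum started at a.2 - a.1
theorem pvA_eq_maxScan (cs : List Char) (a : Int × Int) (h : 0 ≤ a.1) :
    (cs.foldl pvAStep a).2 = max a.2 (pvMaxScan (a.2 - a.1) cs) := by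
  induction cs generalizing a with
  | nil => simp [pvMaxScan]; omega
  | cons c cs ih =>
      simp only [List.foldl, pvMaxScan]
      have hd : (pvAStep a c).2 - (pvAStep a c).1 = a.2 - a.1 + pvDelta c := by
        unfold pvAStep pvDelta; split_ifs <;> simp_all <;> omega
      have hpos : 0 ≤ (pvAStep a c).1 := by
        unfold pvAStep; split_ifs <;> simp_all <;> omega
      rw [ih _ hpos, hd]
      have hge := pvMaxScan_ge (a.2 - a.1 + pvDelta c) cs
      unfold pvAStep pvDelta at *
      split_ifs at * <;> simp_all <;> omega

theorem pvString_eq (s : String) : (s.toList.foldl pvAStep (0, 0)).2 = pvNeed s := by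
  unfold pvNeed
  rw [pvFoldlMax_scanl, pvA_eq_maxScan s.toList (0, 0) (le_refl 0)]
  simp

theorem pvFoldl_eq_map (xs : List String) (acc : List Int) :
    xs.foldl (fun chairs simulation =>
      chairs ++ [(simulation.toList.foldl pvAStep (0, 0)).2]) acc = acc ++ xs.map pvNeed := by
  induction xs generalizing acc with
  | nil => simp
  | cons x xs ih => rw [List.foldl_cons, ih, pvString_eq]; simp

-- ===== VERDICT (by name: the statement is the Claim_ definition above) =====
theorem MinChairs_spec : Claim_equal_MinChairs := by
  intro simulations _
  unfold Spec_MinChairs MinChairs MinChairs_alt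
  rw [pvFoldl_eq_map]
  simp
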